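-- pv_equiv track=rewrite | github.com/lukegarbutt/Project-Euler-Youtube | ProjectEulerYoutube/#032.py | pandigital_check
-- ===== SOURCE A (Python) =====
-- def pandigital_check(number, pair):
-- 	string_digits = str(number)
-- 	for factor in pair:
-- 		string_digits += str(factor)
-- 	if len(string_digits) != 9:
-- 		return(False)
-- 	digits = ['1','2','3','4','5','6','7','8','9']
-- 	for digit in digits:
-- 		if digit not in string_digits:
-- 			return(False)
-- 	return(True)
-- ===== SOURCE B (Python) =====
-- def pandigital_check(number, pair):
--     # sort-and-compare: one canonical comparison replaces the length guard + nine membership scans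
--     return sorted(str(number) + ''.join(map(str, pair))) == list('123456789')
-- ===== Notes on version B (the rewrite author's own statement) =====
-- stated objective: simpler
-- what changed: Replaces the length-9 guard plus the per-digit membership loop with a single sort of the concatenated digit characters compared against the canonical '123456789' sequence.
import Mathlib
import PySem

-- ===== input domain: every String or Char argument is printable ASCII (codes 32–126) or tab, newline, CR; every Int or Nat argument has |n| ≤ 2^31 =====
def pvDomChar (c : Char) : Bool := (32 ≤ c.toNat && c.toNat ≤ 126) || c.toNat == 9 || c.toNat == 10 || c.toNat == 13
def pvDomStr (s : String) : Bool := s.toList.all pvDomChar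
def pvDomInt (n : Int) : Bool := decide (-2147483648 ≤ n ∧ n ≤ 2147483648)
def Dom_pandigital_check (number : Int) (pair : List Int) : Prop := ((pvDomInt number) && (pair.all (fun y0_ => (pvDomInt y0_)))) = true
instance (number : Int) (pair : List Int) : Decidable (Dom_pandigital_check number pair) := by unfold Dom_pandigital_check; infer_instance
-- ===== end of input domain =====

-- ===== PORT A =====
-- literal port of A: build str(number) then += str(factor); length guard; scan for each of nine digits
def pandigital_check (number : Int) (pair : List Int) : Bool :=
  let string_digits : List Char :=
    pair.foldl (fun acc factor => acc ++ PySem.Int.toChars factor) (PySem.Int.toChars number)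
  if string_digits.length ≠ 9 then false
  else
    let digits : List Char := ['1','2','3','4','5','6','7','8','9']
    digits.all (fun digit => decide (digit ∈ string_digits))

-- ===== PORT B =====
-- port of B: sorted(str(number) + ''.join(map(str, pair))) == list('123456789')
def pandigital_check_alt (number : Int) (pair : List Int) : Bool :=
  decide (PySem.List.sorted (PySem.Int.toChars number ++ pair.flatMap (fun f => PySem.Int.toChars f)) (fun x => x) false
    = ['1','2','3','4','5','6','7','8','9'])

-- ===== PRECONDITION & SPEC =====
def Spec_pandigital_check (number : Int) (pair : List Int) (out : Bool) : Prop := out = pandigital_check_alt number pair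
instance (number : Int) (pair : List Int) (out : Bool) : Decidable (Spec_pandigital_check number pair out) := by unfold Spec_pandigital_check; infer_instance

-- ===== CLAIM (what is proved, stated in full; the proofs are below) =====
def Claim_equal_pandigital_check : Prop := ∀ (number : Int) (pair : List Int), Dom_pandigital_check number pair → Spec_pandigital_check number pair (pandigital_check number pair)

-- ===== LEMMAS AND PROOFS =====

lemma key_equiv (s : List Char) :
    ((if s.length ≠ 9 then false
      else (['1','2','3','4','5','6','7','8','9'] : List Char).all (fun d => decide (d ∈ s))) : Bool)
    = decide (PySem.List.sorted s (fun x => x) false = ['1','2','3','4','5','6','7','8','9']) := by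
  set digits : List Char := ['1','2','3','4','5','6','7','8','9'] with hd
  by_cases hlen : s.length = 9
  · simp only [hlen, ne_eq, not_true_eq_false, if_false]
    by_cases hall : ∀ d ∈ digits, d ∈ s
    · have hsub : digits ⊆ s := fun d hdm => hall d hdm
      have hnd : digits.Nodup := by decide
      have hsp : digits.Subperm s := hnd.subperm hsub
      have hperm : digits.Perm s := hsp.perm_of_length_le (by simp [hd, hlen])
      have hsorted : PySem.List.sorted s (fun x => x) false = digits :=
        PySem.List.sorted_id_eq_of_perm_of_pairwise (xs := s) (ys := digits) hperm (by decide)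
      simp [hsorted]
      exact hall
    · push Not at hall
      obtain ⟨d, hdm, hdn⟩ := hall
      have : PySem.List.sorted s (fun x => x) false ≠ digits := by
        intro h
        exact hdn ((PySem.List.mem_sorted (xs := s) (key := fun x => x) (rev := false) (x := d)).mp (h ▸ hdm))
      simp [this]
      exact ⟨d, hdm, hdn⟩
  · have : PySem.List.sorted s (fun x => x) false ≠ digits := by
      intro h
      have := PySem.List.sorted_perm (xs := s) (key := fun x => x) (rev := false)
      have hl := this.length_eq
      rw [h] at hl
      simp [hd] at hl
      exact hlen hl.symm
    simp [hlen, this]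

-- ===== VERDICT (by name: the statement is the Claim_ definition above) =====
theorem pandigital_check_spec : Claim_equal_pandigital_check := by
  intro number pair _
  unfold Spec_pandigital_check pandigital_check pandigital_check_alt
  rw [PySem.List.foldl_append_eq_flatMap]
  exact key_equiv _
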